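-- pv_equiv track=rewrite | github.com/chinmayasharma/recruiting-exercises | inventory-allocator/src/InventoryAllocator.py | trim_shipments
-- ===== SOURCE A (Python) =====
-- from typing import List, Dict, Tuple, Sequence, Set
-- import copy
--
-- ALLOW_PARTIAL = True
--
-- def trim_shipments(shipments: List[Dict], incomplete_items: Set) -> List:
--     """
--     Removes unfulfilled items from shipments.
--     """
--
--     if incomplete_items and not ALLOW_PARTIAL:
--         return []
--
--     trimmed_shipments = copy.deepcopy(shipments)
--     drop_shipments = set()
--
--     for index, shipment in enumerate(shipments):
--         name = next(iter(shipment))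
--
--         for item in shipment[name].keys():
--             if item in incomplete_items or not shipment[name][item]:
--                 del trimmed_shipments[index][name][item]
--
--         # Shipment that no longer has a single item after deleting unfulfilled items
--         if not trimmed_shipments[index][name]:
--             drop_shipments.add(index)
--
--     resulting_shipments = []
--
--     # some shipment will now be empty and should be removed
--     for index, shipment in enumerate(trimmed_shipments):
--         if not index in drop_shipments:
--             resulting_shipments.append(shipment)
--
--
--     return resulting_shipments
-- ===== SOURCE B (Python) =====
-- ALLOW_PARTIAL = True
--
-- def trim_shipments(shipments, incomplete_items):
--     """Single constructive pass: build each kept shipment directly, no deepcopy/del/drop-set/second loop."""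
--     if incomplete_items and not ALLOW_PARTIAL:
--         return []
--     result = []
--     for shipment in shipments:
--         name = next(iter(shipment))
--         filtered = {k: v for k, v in shipment[name].items()
--                     if v and k not in incomplete_items}
--         if filtered:
--             s = dict(shipment)
--             s[name] = filtered
--             result.append(s)
--     return result
-- ===== Notes on version B (the rewrite author's own statement) =====
-- stated objective: simpler
-- what changed: A deep-copies the whole list, deletes unfulfilled items in place from the copy, records drop indices in a set and runs a second index-driven pass; B makes one constructive pass that filters each shipment's inner dict with a comprehension and appends the rebuilt shipment only when the filtered dict is non-empty.
import Mathlib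
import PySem

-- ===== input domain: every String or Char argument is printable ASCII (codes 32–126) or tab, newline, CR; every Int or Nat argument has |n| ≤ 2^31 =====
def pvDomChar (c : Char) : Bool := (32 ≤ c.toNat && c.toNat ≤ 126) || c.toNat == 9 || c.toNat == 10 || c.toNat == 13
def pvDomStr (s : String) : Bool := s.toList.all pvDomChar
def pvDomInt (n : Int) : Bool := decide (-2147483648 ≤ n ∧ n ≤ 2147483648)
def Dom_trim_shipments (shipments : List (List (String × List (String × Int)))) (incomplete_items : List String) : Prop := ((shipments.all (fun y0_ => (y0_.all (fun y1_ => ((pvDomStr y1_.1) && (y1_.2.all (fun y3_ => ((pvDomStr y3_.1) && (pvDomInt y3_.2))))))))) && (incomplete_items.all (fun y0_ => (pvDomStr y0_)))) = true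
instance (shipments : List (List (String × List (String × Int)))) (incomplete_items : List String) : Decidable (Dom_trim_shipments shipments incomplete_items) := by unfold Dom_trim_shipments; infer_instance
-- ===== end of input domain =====

-- B replaces A's deepcopy + in-place deletions + drop-index set + second pass by one constructive
-- pass that builds each kept shipment directly (objective: simpler). Return value only: neither
-- program mutates its arguments (A works on a deep copy).

-- ===== PORT A =====
def ALLOW_PARTIAL : Bool := true

-- `item in incomplete_items or not shipment[name][item]`
def pvCond (incomplete_items : List String) (inner : List (String × Int)) (item : String) : Bool :=
  incomplete_items.contains item || (PySem.Dict.mk inner).getD item 0 == 0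

-- the inner `for item in shipment[name].keys(): … del trimmed_shipments[index][name][item]`
-- (the deletions touch only entry `index` of the deep copy, so they are computed per shipment)
def pvTrimOne (incomplete_items : List String) (shipment : List (String × List (String × Int))) :
    List (String × List (String × Int)) :=
  let name := (shipment.headD ("", [])).1
  let inner := (PySem.Dict.mk shipment).getD name []
  (inner.map Prod.fst).foldl
    (fun t item =>
      if pvCond incomplete_items inner item then
        ((PySem.Dict.mk t).modify name [] (fun d => ((PySem.Dict.mk d).erase item).items)).items
      else t)
    shipment

-- `if not trimmed_shipments[index][name]`
def pvEmptyAfter (incomplete_items : List String) (shipment : List (String × List (String × Int))) : Bool :=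
  ((PySem.Dict.mk (pvTrimOne incomplete_items shipment)).getD (shipment.headD ("", [])).1 []).isEmpty

def trim_shipments (shipments : List (List (String × List (String × Int)))) (incomplete_items : List String) : List (List (String × List (String × Int))) :=
  if !incomplete_items.isEmpty && !ALLOW_PARTIAL then []
  else
    let st := (PySem.List.enumerate shipments).foldl
      (fun (st : List (List (String × List (String × Int))) × List Int) is =>
        (st.1 ++ [pvTrimOne incomplete_items is.2],
         if pvEmptyAfter incomplete_items is.2 then PySem.Set.add st.2 is.1 else st.2))
      ([], [])
    (PySem.List.enumerate st.1).foldl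
      (fun res is => if !(st.2.contains is.1) then res ++ [is.2] else res) []

-- ===== PORT B =====
-- `{k: v for k, v in shipment[name].items() if v and k not in incomplete_items}`
def pvFiltered (incomplete_items : List String) (shipment : List (String × List (String × Int))) :
    List (String × Int) :=
  ((PySem.Dict.mk shipment).getD (shipment.headD ("", [])).1 []).filter
    (fun p => !(p.2 == 0) && !(incomplete_items.contains p.1))

def trim_shipments_alt (shipments : List (List (String × List (String × Int)))) (incomplete_items : List String) : List (List (String × List (String × Int))) :=
  if !incomplete_items.isEmpty && !ALLOW_PARTIAL then []
  else
    shipments.foldl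
      (fun res shipment =>
        let filtered := pvFiltered incomplete_items shipment
        if !filtered.isEmpty then
          res ++ [((PySem.Dict.mk shipment).insert (shipment.headD ("", [])).1 filtered).items]
        else res) []

-- ===== PRECONDITION & SPEC =====
-- Pre_ excludes shipments containing an empty dict, on which A raises StopIteration at
-- `next(iter(shipment))` (B raises there too), and association lists with duplicate keys
-- (outer or inner), which do not represent Python dicts (a dict never holds a key twice).
def Pre_trim_shipments (shipments : List (List (String × List (String × Int)))) (incomplete_items : List String) : Prop :=
  ∀ s ∈ shipments, s ≠ [] ∧ (s.map Prod.fst).Nodup ∧ ∀ p ∈ s, (p.2.map Prod.fst).Nodup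
instance (shipments : List (List (String × List (String × Int)))) (incomplete_items : List String) : Decidable (Pre_trim_shipments shipments incomplete_items) := by unfold Pre_trim_shipments; infer_instance

def pvWitness_trim_shipments : (List (List (String × List (String × Int)))) × List String :=
  ([[("w1", [("apple", 2), ("pen", 0)])], [("w2", [("pen", 3)])]], ["pen"])

def Spec_trim_shipments (shipments : List (List (String × List (String × Int)))) (incomplete_items : List String) (out : List (List (String × List (String × Int)))) : Prop := out = trim_shipments_alt shipments incomplete_items
instance (shipments : List (List (String × List (String × Int)))) (incomplete_items : List String) (out : List (List (String × List (String × Int)))) : Decidable (Spec_trim_shipments shipments incomplete_items out) := by unfold Spec_trim_shipments; infer_instance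

-- ===== CLAIM (what is proved, stated in full; the proofs are below) =====
def Claim_equal_trim_shipments : Prop := ∀ (shipments : List (List (String × List (String × Int)))) (incomplete_items : List String), Dom_trim_shipments shipments incomplete_items → Pre_trim_shipments shipments incomplete_items → Spec_trim_shipments shipments incomplete_items (trim_shipments shipments incomplete_items)

-- ===== LEMMAS AND PROOFS =====

-- overwriting the value at a key that occurs nowhere else leaves the other pairs untouched
theorem pv_map_keep (name : String) (v : String × List (String × Int))
    (rest : List (String × List (String × Int))) (h : name ∉ rest.map Prod.fst) :
    rest.map (fun p => if p.1 == name then v else p) = rest := by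
  induction rest with
  | nil => rfl
  | cons q t ih =>
    simp only [List.map_cons, List.mem_cons, not_or] at h ⊢
    rw [if_neg (by simp; exact fun e => h.1 (by simp [e])), ih h.2]

theorem pv_getD_head (name : String) (d : List (String × Int))
    (rest : List (String × List (String × Int))) :
    (PySem.Dict.mk ((name, d) :: rest)).getD name [] = d := by
  simp [PySem.Dict.getD, PySem.Dict.get?, List.find?]

theorem pv_insert_head (name : String) (d v : List (String × Int))
    (rest : List (String × List (String × Int))) (h : name ∉ rest.map Prod.fst) :
    ((PySem.Dict.mk ((name, d) :: rest)).insert name v).items = (name, v) :: rest := by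
  have hc : (PySem.Dict.mk ((name, d) :: rest)).contains name = true := by
    simp [PySem.Dict.contains]
  simp only [PySem.Dict.insert, hc, if_pos, List.map_cons, beq_self_eq_true]
  exact congrArg _ (pv_map_keep name _ rest h)

theorem pv_modify_head (name : String) (d : List (String × Int))
    (rest : List (String × List (String × Int))) (f : List (String × Int) → List (String × Int))
    (h : name ∉ rest.map Prod.fst) :
    ((PySem.Dict.mk ((name, d) :: rest)).modify name [] f).items = (name, f d) :: rest := by
  rw [PySem.Dict.modify, pv_getD_head, pv_insert_head name d _ rest h]

-- A's deletion loop only rewrites the inner dict sitting at the head key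
theorem pv_chain_head (keys : List String) (name : String) (d : List (String × Int))
    (rest : List (String × List (String × Int))) (c : String → Bool)
    (h : name ∉ rest.map Prod.fst) :
    keys.foldl
      (fun t item =>
        if c item then
          ((PySem.Dict.mk t).modify name [] (fun dd => ((PySem.Dict.mk dd).erase item).items)).items
        else t)
      ((name, d) :: rest)
    = (name, keys.foldl
        (fun d item => if c item then d.filter (fun p => !(p.1 == item)) else d) d) :: rest := by
  induction keys generalizing d with
  | nil => rfl
  | cons k t ih =>
    simp only [List.foldl_cons]
    by_cases hc : c k
    · rw [if_pos hc, if_pos hc, pv_modify_head name d rest _ h]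
      exact ih _
    · rw [if_neg hc, if_neg hc]
      exact ih _

-- the erase chain keeps a pair whose key is hit by no step
theorem pv_erase_chain_cons (keys : List String) (p : String × Int) (d : List (String × Int))
    (c : String → Bool) (h : p.1 ∉ keys) :
    keys.foldl (fun d item => if c item then d.filter (fun q => !(q.1 == item)) else d) (p :: d)
    = p :: keys.foldl (fun d item => if c item then d.filter (fun q => !(q.1 == item)) else d) d := by
  induction keys generalizing d with
  | nil => rfl
  | cons k t ih =>
    simp only [List.mem_cons, not_or] at h
    simp only [List.foldl_cons]
    by_cases hc : c k
    · rw [if_pos hc, if_pos hc, List.filter_cons, if_pos (by simp; exact h.1), ih _ h.2]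
    · rw [if_neg hc, if_neg hc, ih _ h.2]

-- erasing, over its own (distinct) keys, those that satisfy c IS filtering by ¬c
theorem pv_erase_chain_self (l : List (String × Int)) (c : String → Bool)
    (h : (l.map Prod.fst).Nodup) :
    (l.map Prod.fst).foldl
      (fun d item => if c item then d.filter (fun q => !(q.1 == item)) else d) l
    = l.filter (fun q => !(c q.1)) := by
  induction l with
  | nil => rfl
  | cons p t ih =>
    simp only [List.map_cons, List.nodup_cons] at h
    simp only [List.map_cons, List.foldl_cons, List.filter_cons]
    by_cases hc : c p.1
    · simp only [if_pos hc, beq_self_eq_true, Bool.not_true, Bool.false_eq_true, if_false]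
      have htt : t.filter (fun q => !(q.1 == p.1)) = t := by
        apply List.filter_eq_self.mpr
        intro q hq
        simp only [Bool.not_eq_eq_eq_not, Bool.not_true, beq_eq_false_iff_ne, ne_eq]
        exact fun e => h.1 (e ▸ List.mem_map_of_mem hq)
      rw [htt, ih h.2, if_neg (by simp [hc])]
    · rw [if_neg hc, if_pos (by simp [hc])]
      rw [pv_erase_chain_cons _ _ _ _ (by simpa using h.1), ih h.2]

-- per-shipment: A's trimmed shipment IS B's rebuilt shipment
theorem pv_trimOne_eq (incomplete_items : List String)
    (s : List (String × List (String × Int))) (hne : s ≠ [])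
    (hout : (s.map Prod.fst).Nodup) (hin : ∀ p ∈ s, (p.2.map Prod.fst).Nodup) :
    pvTrimOne incomplete_items s
      = ((PySem.Dict.mk s).insert (s.headD ("", [])).1 (pvFiltered incomplete_items s)).items := by
  obtain ⟨⟨name, i0⟩, rest, rfl⟩ : ∃ p rest, s = p :: rest := by
    cases s with | nil => exact absurd rfl hne | cons p rest => exact ⟨p, rest, rfl⟩
  simp only [List.map_cons, List.nodup_cons] at hout
  have hi0 : (i0.map Prod.fst).Nodup := hin _ List.mem_cons_self
  simp only [pvTrimOne, pvFiltered, List.headD_cons, pv_getD_head]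
  rw [pv_chain_head _ _ _ _ _ hout.1, pv_erase_chain_self _ _ hi0,
    pv_insert_head _ i0 _ _ hout.1]
  congr 1
  · congr 1
    apply List.filter_congr
    intro q hq
    have hg : (PySem.Dict.mk i0).getD q.1 0 = q.2 :=
      PySem.Dict.getD_of_mem_items _ (by simpa using hq) (by simpa [PySem.Dict.keys] using hi0) 0
    simp [pvCond, hg, Bool.and_comm]

-- per-shipment: A's drop test agrees with B's keep test
theorem pv_emptyAfter_eq (incomplete_items : List String)
    (s : List (String × List (String × Int))) (hne : s ≠ [])
    (hout : (s.map Prod.fst).Nodup) (hin : ∀ p ∈ s, (p.2.map Prod.fst).Nodup) :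
    pvEmptyAfter incomplete_items s = (pvFiltered incomplete_items s).isEmpty := by
  rw [pvEmptyAfter, pv_trimOne_eq incomplete_items s hne hout hin]
  obtain ⟨⟨name, i0⟩, rest, rfl⟩ : ∃ p rest, s = p :: rest := by
    cases s with | nil => exact absurd rfl hne | cons p rest => exact ⟨p, rest, rfl⟩
  simp only [List.map_cons, List.nodup_cons] at hout
  rw [List.headD_cons, pv_insert_head _ i0 _ _ hout.1, pv_getD_head]

theorem pv_enumerate_fst_ge {α : Type} (l : List α) (m : Int) (x : Int × α)
    (h : x ∈ PySem.List.enumerate l m) : m ≤ x.1 := by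
  induction l generalizing m with
  | nil => simp [PySem.List.enumerate] at h
  | cons a t ih =>
    rw [PySem.List.enumerate_cons] at h
    rcases List.mem_cons.mp h with h | h
    · subst h; simp
    · have := ih (m + 1) h; omega

-- closed form of A's first loop: the trimmed list and the drop-index set
theorem pv_foldA_closed {α β : Type} [BEq β] (g : α → β) (p : α → Bool)
    (ships : List α) (n : Int) (tAcc : List β) (dAcc : List Int)
    (hd : ∀ j ∈ dAcc, j < n) :
    (PySem.List.enumerate ships n).foldl
      (fun (st : List β × List Int) is =>
        (st.1 ++ [g is.2], if p is.2 then PySem.Set.add st.2 is.1 else st.2))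
      (tAcc, dAcc)
    = (tAcc ++ ships.map g,
       dAcc ++ ((PySem.List.enumerate ships n).filter (fun is => p is.2)).map Prod.fst) := by
  induction ships generalizing n tAcc dAcc with
  | nil => simp [PySem.List.enumerate]
  | cons s t ih =>
    rw [PySem.List.enumerate_cons]
    simp only [List.foldl_cons, List.filter_cons]
    by_cases hp : p s
    · rw [if_pos hp, if_pos (by simpa using hp)]
      have hnm : n ∉ dAcc := fun hmem => absurd (hd n hmem) (lt_irrefl n)
      have hfresh : PySem.Set.add dAcc n = dAcc ++ [n] := by
        simp [PySem.Set.add, List.contains_eq_mem, hnm]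
      have hb : ∀ j ∈ dAcc ++ [n], j < n + 1 := by
        intro j hj
        rcases List.mem_append.mp hj with h | h
        · have := hd j h; omega
        · simp only [List.mem_singleton] at h; omega
      rw [hfresh, ih (n+1) (tAcc ++ [g s]) (dAcc ++ [n]) hb]
      simp
    · rw [if_neg hp, if_neg (by simpa using hp)]
      rw [ih (n+1) (tAcc ++ [g s]) dAcc (by intro j hj; exact lt_trans (hd j hj) (by omega))]
      simp

-- A's second loop, driven by the drop-index set, is a per-shipment filter
theorem pv_second_loop {α β : Type} (ships : List α) (n : Int)
    (D' : List Int) (g : α → β) (p : α → Bool) (hd : ∀ j ∈ D', j < n) :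
    ((PySem.List.enumerate (ships.map g) n).filter
        (fun is => !((D' ++ ((PySem.List.enumerate ships n).filter
            (fun is => p is.2)).map Prod.fst).contains is.1))).map Prod.snd
    = (ships.filter (fun s => !(p s))).map g := by
  induction ships generalizing n D' with
  | nil => simp [PySem.List.enumerate]
  | cons s t ih =>
    by_cases hp : p s
    · simp only [List.map_cons, PySem.List.enumerate_cons, List.filter_cons, hp,
        Bool.not_true, if_true, Bool.false_eq_true, if_false]
      rw [if_neg (by simp [List.contains_eq_mem])]
      have hassoc : D' ++ n :: ((PySem.List.enumerate t (n+1)).filter (fun is => p is.2)).map Prod.fst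
          = (D' ++ [n]) ++ ((PySem.List.enumerate t (n+1)).filter (fun is => p is.2)).map Prod.fst := by
        simp
      have hb : ∀ j ∈ D' ++ [n], j < n + 1 := by
        intro j hj
        rcases List.mem_append.mp hj with h | h
        · have := hd j h; omega
        · simp only [List.mem_singleton] at h; omega
      rw [hassoc, ih (n+1) (D' ++ [n]) hb]
    · simp only [List.map_cons, PySem.List.enumerate_cons, List.filter_cons, hp,
        Bool.not_false, if_true, Bool.false_eq_true, if_false]
      have hnm : (n : Int) ∉ D' ++ ((PySem.List.enumerate t (n+1)).filter (fun is => p is.2)).map Prod.fst := by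
        intro hmem
        rcases List.mem_append.mp hmem with h | h
        · exact absurd (hd n h) (lt_irrefl n)
        · rcases List.mem_map.mp h with ⟨x, hx, hfst⟩
          have := pv_enumerate_fst_ge t (n+1) x (List.mem_of_mem_filter hx)
          omega
      rw [if_pos (by simp only [List.contains_eq_mem]; simpa using hnm)]
      rw [List.map_cons, ih (n+1) D' (by intro j hj; have := hd j hj; omega)]

-- ===== VERDICT (by name: the statement is the Claim_ definition above) =====
theorem trim_shipments_spec : Claim_equal_trim_shipments := by
  intro shipments incomplete_items _hdom hpre
  unfold Spec_trim_shipments trim_shipments trim_shipments_alt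
  simp only [ALLOW_PARTIAL, Bool.not_true, Bool.and_false, Bool.false_eq_true, if_false]
  rw [pv_foldA_closed (pvTrimOne incomplete_items) (pvEmptyAfter incomplete_items)
      shipments 0 [] [] (by intro j hj; simp at hj)]
  rw [PySem.List.foldl_append_if
      (fun is => !(((([] : List Int) ++ ((PySem.List.enumerate shipments 0).filter
          (fun is => pvEmptyAfter incomplete_items is.2)).map Prod.fst)).contains is.1))
      Prod.snd _ []]
  rw [PySem.List.foldl_append_if
      (fun shipment => !(pvFiltered incomplete_items shipment).isEmpty)
      (fun shipment => ((PySem.Dict.mk shipment).insert (shipment.headD ("", [])).1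
          (pvFiltered incomplete_items shipment)).items) shipments []]
  have hsl := pv_second_loop shipments 0 [] (pvTrimOne incomplete_items)
      (pvEmptyAfter incomplete_items) (by intro j hj; simp at hj)
  simp only [List.nil_append] at hsl ⊢
  rw [hsl]
  have hfeq : shipments.filter (fun s => !(pvEmptyAfter incomplete_items s))
      = shipments.filter (fun s => !(pvFiltered incomplete_items s).isEmpty) := by
    apply List.filter_congr
    intro s hs
    obtain ⟨h1, h2, h3⟩ := hpre s hs
    rw [pv_emptyAfter_eq incomplete_items s h1 h2 h3]
  rw [hfeq]
  apply List.map_congr_left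
  intro s hs
  have hs' := List.mem_of_mem_filter hs
  obtain ⟨h1, h2, h3⟩ := hpre s hs'
  exact pv_trimOne_eq incomplete_items s h1 h2 h3
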